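-- pv_equiv track=rewrite | github.com/PublicSatanicVoid/linux-utils | fastmod.py | check_perm
-- ===== SOURCE A (Python) =====
-- def check_perm(s):
--     """Checks the permissions string to ensure it makes sense.
--
--     Note that strings like '+' and 'u-' are accepted by chmod, but they do not
--     actually change anything. As a convenience, we can check for these cases
--     and avoid calling chmod entirely.
--
--     Return: tuple:
--         [0] Whether the string is a valid permission string;
--         [1] Whether the permission string has any effect.
--     """
--     try:
--         n = int(s)
--         valid = n >= 0 and n <= 0o7777
--         return valid, valid
--     except ValueError:
--         pass
--     selectors = ["u", "g", "o", "a", ""]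
--     operators = ["+", "-", "="]
--     permissions = ["r", "w", "x", "X", "s", "t", ""]
--     nontrivial = False
--     for group in s.split(","):
--         sel = ""
--         op = None
--         for c in group:
--             if c in operators:
--                 op = c
--                 if op == "=":
--                     nontrivial = True
--             elif not op:
--                 if c in selectors:
--                     sel += c
--                 else:
--                     return False, False
--             elif c in permissions:
--                 nontrivial = True
--             else:
--                 return False, False
--         if not op:
--             return False, False
--
--     return True, nontrivial
-- ===== SOURCE B (Python) =====
-- def check_perm(s):
--     """Validate a chmod permission string; return (valid, has_effect)."""
--     try:
--         n = int(s)
--         valid = n >= 0 and n <= 0o7777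
--         return valid, valid
--     except ValueError:
--         pass
--     groups = s.split(",")
--     for group in groups:
--         i = next((j for j, c in enumerate(group) if c in "+-="), None)
--         if i is None:
--             return False, False
--         if any(c not in "ugoa" for c in group[:i]):
--             return False, False
--         if any(c not in "+-=rwxXst" for c in group[i:]):
--             return False, False
--     return True, any(c in "=rwxXst" for g in groups for c in g)
-- ===== Notes on version B (the rewrite author's own statement) =====
-- stated objective: simpler
-- what changed: A's per-character state machine (selector/operator/permission phases tracked with an op flag and early returns) is replaced by splitting each comma group at its first operator and checking the two halves with membership tests, with the has-effect flag computed by one scan for effect-bearing characters (equals sign or a permission letter) instead of being threaded through the loop state.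
import Mathlib
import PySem

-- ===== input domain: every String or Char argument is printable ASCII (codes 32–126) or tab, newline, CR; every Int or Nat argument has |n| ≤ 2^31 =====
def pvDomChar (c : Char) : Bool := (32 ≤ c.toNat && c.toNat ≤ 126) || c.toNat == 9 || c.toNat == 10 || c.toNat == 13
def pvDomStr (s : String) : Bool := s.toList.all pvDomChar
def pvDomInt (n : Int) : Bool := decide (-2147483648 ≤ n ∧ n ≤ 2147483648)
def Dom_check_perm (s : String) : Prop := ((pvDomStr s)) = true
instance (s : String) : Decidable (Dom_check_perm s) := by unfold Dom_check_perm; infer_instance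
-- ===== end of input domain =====

-- B replaces A's per-character operator/selector state machine by splitting each
-- group at its first operator and checking the two halves with membership tests
-- (objective: simpler). Same return value everywhere; A is total.

-- ===== PORT A =====
-- inner `for c in group` loop of A; state = (sel, op, nontrivial); none = early `return False, False`
def pvGroupA : List Char → String → Option Char → Bool → Option Bool
  | [], _, op, nt => if op.isNone then none else some nt
  | c :: rest, sel, op, nt =>
    if decide (c ∈ ['+', '-', '=']) then
      pvGroupA rest sel (some c) (if c = '=' then true else nt)
    else if op.isNone then
      (if decide (c ∈ ['u', 'g', 'o', 'a']) then pvGroupA rest (sel.push c) op nt else none)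
    else if decide (c ∈ ['r', 'w', 'x', 'X', 's', 't']) then
      pvGroupA rest sel op true
    else none

-- outer `for group in s.split(",")` loop of A
def pvLoopA : List (List Char) → Bool → Bool × Bool
  | [], nt => (true, nt)
  | g :: gs, nt =>
    match pvGroupA g "" none nt with
    | none => (false, false)
    | some nt' => pvLoopA gs nt'

def check_perm (s : String) : Bool × Bool :=
  match PySem.Int.ofStr? s with
  | some n =>
    let valid := decide (n ≥ 0 ∧ n ≤ 4095)
    (valid, valid)
  | none => pvLoopA (PySem.Chars.splitOn s.toList [',']) false

-- ===== PORT B =====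
-- one group is valid iff it has a first operator, only selectors before it, only
-- operators/permissions from it on
def pvGroupOkB (g : List Char) : Bool :=
  match g.findIdx? (fun c => decide (c ∈ ['+', '-', '='])) with
  | none => false
  | some i =>
    (g.take i).all (fun c => decide (c ∈ ['u', 'g', 'o', 'a'])) &&
    (g.drop i).all (fun c => decide (c ∈ ['+', '-', '=', 'r', 'w', 'x', 'X', 's', 't']))

def check_perm_alt (s : String) : Bool × Bool :=
  match PySem.Int.ofStr? s with
  | some n =>
    let valid := decide (n ≥ 0 ∧ n ≤ 4095)
    (valid, valid)
  | none =>
    let groups := PySem.Chars.splitOn s.toList [',']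
    if groups.all pvGroupOkB then
      (true, groups.any (fun g => g.any (fun c => decide (c ∈ ['=', 'r', 'w', 'x', 'X', 's', 't']))))
    else (false, false)

-- ===== PRECONDITION & SPEC =====
def Spec_check_perm (s : String) (out : Bool × Bool) : Prop := out = check_perm_alt s
instance (s : String) (out : Bool × Bool) : Decidable (Spec_check_perm s out) := by unfold Spec_check_perm; infer_instance

-- ===== CLAIM (what is proved, stated in full; the proofs are below) =====
def Claim_equal_check_perm : Prop := ∀ (s : String), Dom_check_perm s → Spec_check_perm s (check_perm s)

-- ===== LEMMAS AND PROOFS =====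
def pvNT (c : Char) : Bool := decide (c ∈ ['=', 'r', 'w', 'x', 'X', 's', 't'])
def pvP2 (c : Char) : Bool := decide (c ∈ ['+', '-', '=', 'r', 'w', 'x', 'X', 's', 't'])

theorem pvGroupA_op (l : List Char) : ∀ (sel : String) (o : Char) (nt : Bool),
    pvGroupA l sel (some o) nt =
      if l.all pvP2 then some (nt || l.any pvNT) else none := by
  induction l with
  | nil => intro sel o nt; simp [pvGroupA]
  | cons c rest ih =>
    intro sel o nt
    by_cases hop : c ∈ ['+', '-', '=']
    · simp only [List.mem_cons, List.not_mem_nil, or_false] at hop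
      rcases hop with rfl | rfl | rfl <;>
        simp [pvGroupA, ih, pvP2, pvNT]
    · by_cases hpm : c ∈ ['r', 'w', 'x', 'X', 's', 't']
      · simp only [List.mem_cons, List.not_mem_nil, or_false] at hpm
        rcases hpm with rfl | rfl | rfl | rfl | rfl | rfl <;>
          simp [pvGroupA, ih, pvP2, pvNT]
      · simp only [List.mem_cons, List.not_mem_nil, or_false, not_or] at hop hpm
        obtain ⟨h1, h2, h3⟩ := hop
        obtain ⟨h4, h5, h6, h7, h8, h9⟩ := hpm
        simp [pvGroupA, pvP2, h1, h2, h3, h4, h5, h6, h7, h8, h9]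

-- phase 1: before the first operator A only accepts selectors; B's split-at-first-operator
-- check computes the same predicate
theorem pvGroupA_none (l : List Char) : ∀ (sel : String) (nt : Bool),
    pvGroupA l sel none nt =
      if pvGroupOkB l then some (nt || l.any pvNT) else none := by
  induction l with
  | nil => intro sel nt; simp [pvGroupA, pvGroupOkB]
  | cons c rest ih =>
    intro sel nt
    by_cases hop : c ∈ ['+', '-', '=']
    · simp only [List.mem_cons, List.not_mem_nil, or_false] at hop
      rcases hop with rfl | rfl | rfl <;>
        simp [pvGroupA, pvGroupA_op, pvGroupOkB, List.findIdx?_cons, pvP2, pvNT]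
    · by_cases hsel : c ∈ ['u', 'g', 'o', 'a']
      · simp only [List.mem_cons, List.not_mem_nil, or_false] at hsel
        rcases hsel with rfl | rfl | rfl | rfl <;>
        · cases hfi : rest.findIdx? (fun c => decide (c ∈ ['+', '-', '='])) with
          | none =>
            simp only [List.mem_cons, List.not_mem_nil, or_false, Bool.decide_or] at hfi
            simp [pvGroupA, pvGroupOkB, List.findIdx?_cons, hfi, ih]
          | some i =>
            simp only [List.mem_cons, List.not_mem_nil, or_false, Bool.decide_or] at hfi
            simp [pvGroupA, pvGroupOkB, List.findIdx?_cons, hfi, ih, pvNT]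
      · simp only [List.mem_cons, List.not_mem_nil, or_false, not_or] at hop hsel
        obtain ⟨h1, h2, h3⟩ := hop
        obtain ⟨h4, h5, h6, h7⟩ := hsel
        cases hfi : rest.findIdx? (fun c => decide (c ∈ ['+', '-', '='])) with
        | none =>
          simp only [List.mem_cons, List.not_mem_nil, or_false, Bool.decide_or] at hfi
          simp [pvGroupA, pvGroupOkB, List.findIdx?_cons, hfi, h1, h2, h3, h4, h5, h6, h7]
        | some i =>
          simp only [List.mem_cons, List.not_mem_nil, or_false, Bool.decide_or] at hfi
          simp [pvGroupA, pvGroupOkB, List.findIdx?_cons, hfi, h1, h2, h3, h4, h5, h6, h7]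

theorem pvLoopA_eq (gs : List (List Char)) : ∀ (nt : Bool),
    pvLoopA gs nt =
      if gs.all pvGroupOkB then (true, nt || gs.any (fun g => g.any pvNT))
      else (false, false) := by
  induction gs with
  | nil => intro nt; simp [pvLoopA]
  | cons g gs ih =>
    intro nt
    simp only [pvLoopA, pvGroupA_none, List.all_cons, List.any_cons]
    by_cases hok : pvGroupOkB g = true
    · simp [hok, ih, Bool.or_assoc]
    · rw [Bool.not_eq_true] at hok
      simp [hok]

-- ===== VERDICT (by name: the statement is the Claim_ definition above) =====
theorem check_perm_spec : Claim_equal_check_perm := by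
  intro s _
  unfold Spec_check_perm check_perm check_perm_alt
  cases PySem.Int.ofStr? s with
  | some n => rfl
  | none =>
    simp only [pvLoopA_eq, Bool.false_or]
    rfl
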